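-- pv_equiv track=rewrite | github.com/wumusill/Programmers | Lv2/paint_over.py | solution
-- ===== SOURCE A (Python) =====
-- def solution(n, m, section):
--     answer = 0
--     mi, ma = section[0], section[-1]
--
--     for i in range(mi, ma+1, m):
--         while section and i > section[0]:
--             section.pop(0)
--         answer += 1
--     return answer
-- ===== SOURCE B (Python) =====
-- def solution(n, m, section):
--     # Closed form (simpler): the answer is just len(range(section[0], section[-1]+1, m)),
--     # i.e. ceiling division, computed without any loop (return value only:
--     # A pops from `section` in place, B leaves it untouched).
--     return max(0, -((section[0] - section[-1] - 1) // m))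
-- ===== Notes on version B (the rewrite author's own statement) =====
-- stated objective: simpler
-- what changed: A loops over every roller position and pops section elements one by one; B notes the answer is just the length of range(section[0], section[-1]+1, m) and returns it as a single ceiling-division formula, with no loop and no mutation of section.
import Mathlib
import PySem

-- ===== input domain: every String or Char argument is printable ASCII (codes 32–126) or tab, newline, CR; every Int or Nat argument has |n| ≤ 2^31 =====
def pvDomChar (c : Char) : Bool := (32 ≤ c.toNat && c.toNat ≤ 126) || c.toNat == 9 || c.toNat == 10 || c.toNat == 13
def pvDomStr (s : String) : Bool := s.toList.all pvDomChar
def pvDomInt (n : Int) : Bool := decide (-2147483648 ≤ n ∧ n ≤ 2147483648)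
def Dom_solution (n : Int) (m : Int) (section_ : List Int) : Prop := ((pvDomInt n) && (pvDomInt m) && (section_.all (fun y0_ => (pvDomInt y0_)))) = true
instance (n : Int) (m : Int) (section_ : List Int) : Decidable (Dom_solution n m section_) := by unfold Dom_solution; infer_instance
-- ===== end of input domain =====

-- B replaces A's loop over all roller positions by a closed-form ceiling division;
-- equivalence is about the RETURN value only: A pops elements of section_ in place, B does not mutate it.

-- ===== PORT A =====
-- inner `while section and i > section[0]: section.pop(0)`
def popWhileA (i : Int) : List Int → List Int
  | [] => []
  | x :: xs => if i > x then popWhileA i xs else x :: xs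

def solution (n : Int) (m : Int) (section_ : List Int) : Int :=
  match PySem.List.pyGet? section_ 0, PySem.List.pyGet? section_ (-1) with
  | some mi, some ma =>
      ((PySem.List.pyRange mi (ma + 1) m).foldl
        (fun (st : List Int × Int) i => (popWhileA i st.1, st.2 + 1)) (section_, (0 : Int))).2
  | _, _ => 0  -- unreachable under Pre_ (Python raises IndexError on empty section)

-- ===== PORT B =====
def solution_alt (n : Int) (m : Int) (section_ : List Int) : Int :=
  -- Source B is a single expression; the two pyGet? lookups are none only on the empty
  -- list (Python IndexError, excluded by Pre_), where 0 is returned as a default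
  (((PySem.List.pyGet? section_ 0).bind fun mi =>
      (PySem.List.pyGet? section_ (-1)).map fun ma =>
        max 0 (-(PySem.Int.floordiv (mi - ma - 1) m))).getD 0)

-- ===== PRECONDITION & SPEC =====
-- Python A raises IndexError on an empty section and ValueError (range step 0) when m = 0; nothing else is excluded.
def Pre_solution (n : Int) (m : Int) (section_ : List Int) : Prop := section_ ≠ [] ∧ m ≠ 0
instance (n : Int) (m : Int) (section_ : List Int) : Decidable (Pre_solution n m section_) := by unfold Pre_solution; infer_instance
def pvWitness_solution : Int × Int × List Int := (8, 4, [2, 3, 6])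

def Spec_solution (n : Int) (m : Int) (section_ : List Int) (out : Int) : Prop := out = solution_alt n m section_
instance (n : Int) (m : Int) (section_ : List Int) (out : Int) : Decidable (Spec_solution n m section_ out) := by unfold Spec_solution; infer_instance

-- ===== CLAIM (what is proved, stated in full; the proofs are below) =====
def Claim_equal_solution : Prop := ∀ (n : Int) (m : Int) (section_ : List Int), Dom_solution n m section_ → Pre_solution n m section_ → Spec_solution n m section_ (solution n m section_)

-- ===== LEMMAS AND PROOFS =====

-- the fold only counts: its second component is the initial counter plus the list length
theorem foldl_count (l : List Int) (s : List Int) (a : Int) :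
    (l.foldl (fun (st : List Int × Int) i => (popWhileA i st.1, st.2 + 1)) (s, a)).2
      = a + l.length := by
  induction l generalizing s a with
  | nil => simp
  | cons x xs ih => simp [List.foldl, ih]; ring

-- ceiling division computes the length of a positive-step range
theorem ceil_len (p d : Int) (hp : 0 < p) :
    max 0 (-(PySem.Int.floordiv (-d) p))
      = ((if 0 < d then ((d + p - 1) / p).toNat else 0 : ℕ) : Int) := by
  set q : Int := -(PySem.Int.floordiv (-d) p) with hq
  have hb : (q - 1) * p < d ∧ d ≤ q * p :=
    (PySem.Int.neg_floordiv_neg_eq_iff_of_pos hp).mp hq.symm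
  by_cases hd : 0 < d
  · have hq1 : 1 ≤ q := by
      by_contra h
      push Not at h
      have : q * p ≤ 0 := mul_nonpos_iff.mpr (Or.inr ⟨by omega, le_of_lt hp⟩)
      omega
    have hdiv : PySem.Int.floordiv (d + p - 1) p = q := by
      rw [PySem.Int.floordiv_eq_iff_of_pos hp]
      constructor <;> nlinarith [hb.1, hb.2]
    rw [PySem.Int.floordiv_eq_ediv_of_pos hp] at hdiv
    simp only [hd, if_pos, hdiv]
    omega
  · have hq0 : q ≤ 0 := by
      by_contra h
      push Not at h
      have : 0 ≤ (q - 1) * p := mul_nonneg (by omega) (le_of_lt hp)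
      omega
    simp only [hd, if_neg, not_false_iff]
    omega

-- the answer is the length of the range, and B's formula computes exactly that length
theorem key (mi ma m : Int) (hm : m ≠ 0) :
    ((PySem.List.pyRange mi (ma + 1) m).length : Int)
      = max 0 (-(PySem.Int.floordiv (mi - ma - 1) m)) := by
  rcases lt_or_gt_of_ne hm with hneg | hpos
  · have h1 : PySem.Int.floordiv (mi - ma - 1) m
        = PySem.Int.floordiv (-(-(mi - ma - 1))) (-(-m)) := by ring_nf
    rw [h1, PySem.Int.floordiv_neg_neg]
    rw [ceil_len (-m) (mi - ma - 1) (by omega)]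
    have hnp : ¬ 0 < m := by omega
    simp only [PySem.List.pyRange, hm, if_neg, not_false_iff, hnp,
      List.length_map, List.length_range]
    have e : mi - (ma + 1) + -m - 1 = mi - ma - 1 + -m - 1 := by ring
    rw [e]
    by_cases h : 0 < mi - ma - 1
    · rw [if_pos (show ma + 1 < mi by omega), if_pos h]
    · rw [if_neg (show ¬ ma + 1 < mi by omega), if_neg h]
  · have h1 : mi - ma - 1 = -(ma + 1 - mi) := by ring
    rw [h1, ceil_len m (ma + 1 - mi) hpos]
    simp only [PySem.List.pyRange, hm, if_neg, not_false_iff, hpos, if_pos,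
      List.length_map, List.length_range]
    by_cases h : 0 < ma + 1 - mi
    · rw [if_pos (show mi < ma + 1 by omega), if_pos h]
    · rw [if_neg (show ¬ mi < ma + 1 by omega), if_neg h]

-- ===== VERDICT (by name: the statement is the Claim_ definition above) =====
theorem solution_spec : Claim_equal_solution := by
  intro n m section_ _ hpre
  obtain ⟨hne, hm⟩ := hpre
  unfold Spec_solution solution solution_alt
  cases h0 : PySem.List.pyGet? section_ 0 with
  | none => cases h1 : PySem.List.pyGet? section_ (-1) <;> simp
  | some mi =>
    cases h1 : PySem.List.pyGet? section_ (-1) with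
    | none => simp
    | some ma =>
      simp only [Option.bind_some, Option.map_some, Option.getD_some, foldl_count, zero_add]
      exact key mi ma m hm
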